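-- pv_equiv track=rewrite | github.com/yam89421/MLH-EPILEPSY-EEG | P3_fused.py | find_seizure_episodes
-- ===== SOURCE A (Python) =====
-- STEP_SEC              = 1.0
--
-- PREICTAL_SEC          = 300
--
-- MIN_INTER_SEIZURE_SEC = 1300
--
-- def find_seizure_episodes(labels):
--     n = len(labels)
--     raw_episodes = []
--     i = 0
--     while i < n:
--         if labels[i] == 2:
--             pre_start = i
--             while i < n and labels[i] == 2:
--                 i += 1
--             ictal_start = i
--             while i < n and labels[i] == 1:
--                 i += 1
--             raw_episodes.append({
--                 "preictal_start": pre_start,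
--                 "ictal_start":    ictal_start,
--                 "ictal_end":      i,
--             })
--         else:
--             i += 1
--
--     min_gap = int(MIN_INTER_SEIZURE_SEC / STEP_SEC)
--     filtered = []
--     for ep in raw_episodes:
--         if filtered and ep["preictal_start"] - filtered[-1]["ictal_end"] < min_gap:
--             continue
--         filtered.append(ep)
--
--     preictal_win = int(PREICTAL_SEC / STEP_SEC)
--     episodes = []
--     for ep in filtered:
--         trimmed = max(ep["preictal_start"], ep["ictal_start"] - preictal_win)
--         episodes.append({
--             "preictal_start": trimmed,
--             "ictal_start":    ep["ictal_start"],
--             "ictal_end":      ep["ictal_end"],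
--         })
--     return episodes
-- ===== SOURCE B (Python) =====
-- def find_seizure_episodes(labels):
--     # Run-length encode the label sequence, then walk the runs once,
--     # pairing each 2-run with an immediately following 1-run and
--     # applying the gap filter and trimming on the fly.
--     runs = []
--     n = len(labels)
--     i = 0
--     while i < n:
--         j = i
--         while j < n and labels[j] == labels[i]:
--             j += 1
--         runs.append((labels[i], i, j))
--         i = j
--
--     episodes = []
--     last_ictal_end = None
--     k = 0
--     while k < len(runs):
--         v, s, e = runs[k]
--         if v != 2:
--             k += 1
--             continue
--         ictal_start = e
--         if k + 1 < len(runs) and runs[k + 1][0] == 1: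
--             ictal_end = runs[k + 1][2]
--             k += 2
--         else:
--             ictal_end = ictal_start
--             k += 1
--         if last_ictal_end is None or s - last_ictal_end >= 1300:
--             episodes.append({
--                 "preictal_start": max(s, ictal_start - 300),
--                 "ictal_start":    ictal_start,
--                 "ictal_end":      ictal_end,
--             })
--             last_ictal_end = ictal_end
--     return episodes
-- ===== Notes on version B (the rewrite author's own statement) =====
-- stated objective: alternative
-- what changed: B first run-length encodes the label sequence into (value, start, end) runs, then walks the run list once, pairing each 2-run with an immediately following 1-run and applying the gap filter and preictal trimming on the fly, instead of A's three passes (index-stepping state machine, then gap filter over raw episodes, then a trimming map).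
import Mathlib
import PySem

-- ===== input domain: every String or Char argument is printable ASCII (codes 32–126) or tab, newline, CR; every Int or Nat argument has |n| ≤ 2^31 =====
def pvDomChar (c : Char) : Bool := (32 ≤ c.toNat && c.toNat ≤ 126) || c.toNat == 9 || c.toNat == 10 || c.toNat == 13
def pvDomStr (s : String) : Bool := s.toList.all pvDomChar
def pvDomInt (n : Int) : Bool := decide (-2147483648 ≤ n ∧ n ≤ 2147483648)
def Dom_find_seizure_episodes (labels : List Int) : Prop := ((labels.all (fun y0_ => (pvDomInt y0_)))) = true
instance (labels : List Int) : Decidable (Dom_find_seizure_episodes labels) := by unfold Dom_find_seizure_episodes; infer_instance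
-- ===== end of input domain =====

-- B re-implements A by run-length encoding the labels and a single pass over the runs
-- (alternative decomposition, same complexity); equivalence of return values is proved below.

-- Shared helper: the Python inner loop "while i < n and labels[i] == v: i += 1",
-- acting on the suffix of the list; returns the final index and the remaining suffix.
def spanEq (v : Int) : List Int → Int → Int × List Int
  | [], i => (i, [])
  | x :: xs, i => if x = v then spanEq v xs (i + 1) else (i, x :: xs)

theorem spanEq_len_le (v : Int) : ∀ (xs : List Int) (i : Int), (spanEq v xs i).2.length ≤ xs.length := by
  intro xs
  induction xs with
  | nil => intro i; simp [spanEq]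
  | cons x xs ih =>
    intro i
    simp only [spanEq]
    split
    · exact le_trans (ih (i + 1)) (Nat.le_succ _)
    · simp

-- ===== PORT A =====
-- A's outer while loop: at a 2, consume the 2-run then the 1-run, record the raw
-- episode (pre_start, ictal_start, ictal_end); otherwise step one element.
def rawScan : List Int → Int → List (Int × Int × Int)
  | [], _ => []
  | x :: xs, i =>
    if x = 2 then
      let p := spanEq 2 xs (i + 1)
      let q := spanEq 1 p.2 p.1
      (i, p.1, q.1) :: rawScan q.2 q.1
    else rawScan xs (i + 1)
  termination_by xs _ => xs.length
  decreasing_by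
    · have h1 := spanEq_len_le 2 xs (i + 1)
      have h2 := spanEq_len_le 1 (spanEq 2 xs (i + 1)).2 (spanEq 2 xs (i + 1)).1
      simp only [List.length_cons]; omega
    · simp

-- A's second pass: skip an episode whose preictal_start is closer than min_gap (= 1300,
-- int(1300/1.0) computed exactly) to the previous kept episode's (untrimmed) ictal_end.
def filtStep (acc : List (Int × Int × Int)) (ep : Int × Int × Int) : List (Int × Int × Int) :=
  match acc.getLast? with
  | some l => if ep.1 - l.2.2 < 1300 then acc else acc ++ [ep]
  | none => acc ++ [ep]

-- A's third pass: trim the preictal window (preictal_win = int(300/1.0) = 300, exact).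
def trimEp (ep : Int × Int × Int) : List (String × Int) :=
  [("preictal_start", max ep.1 (ep.2.1 - 300)), ("ictal_start", ep.2.1), ("ictal_end", ep.2.2)]

def find_seizure_episodes (labels : List Int) : List (List (String × Int)) :=
  let raw := rawScan labels 0
  let filtered := raw.foldl filtStep []
  filtered.map trimEp

-- ===== PORT B =====
-- B pass 1: run-length encode into (value, start, end) runs.
def runsOf : List Int → Int → List (Int × Int × Int)
  | [], _ => []
  | x :: xs, i =>
    let p := spanEq x xs (i + 1)
    (x, i, p.1) :: runsOf p.2 p.1
  termination_by xs _ => xs.length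
  decreasing_by
    have h := spanEq_len_le x xs (i + 1)
    simp only [List.length_cons]; omega

-- B pass 2: walk the runs, pairing each 2-run with a following 1-run,
-- filtering by the inter-seizure gap and trimming on the fly.
def gapOK (last : Option Int) (s : Int) : Bool :=
  match last with
  | none => true
  | some le => decide (s - le >= 1300)

def pairRun (e : Int) (rest : List (Int × Int × Int)) : Int × List (Int × Int × Int) :=
  match rest with
  | (w, _, e2) :: rest2 => if w = 1 then (e2, rest2) else (e, rest)
  | [] => (e, [])

theorem pairRun_len_le (e : Int) (rest : List (Int × Int × Int)) :
    (pairRun e rest).2.length ≤ rest.length := by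
  cases rest with
  | nil => simp [pairRun]
  | cons r rest2 => obtain ⟨w, s2, e2⟩ := r; simp only [pairRun]; split <;> simp

def emitRuns : List (Int × Int × Int) → Option Int → List (List (String × Int))
  | [], _ => []
  | (v, s, e) :: rest, last =>
    if v = 2 then
      let pr := pairRun e rest
      if gapOK last s then
        [("preictal_start", max s (e - 300)), ("ictal_start", e), ("ictal_end", pr.1)]
          :: emitRuns pr.2 (some pr.1)
      else emitRuns pr.2 last
    else emitRuns rest last
  termination_by l _ => l.length
  decreasing_by
    · have := pairRun_len_le e rest; simp only [List.length_cons]; omega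
    · have := pairRun_len_le e rest; simp only [List.length_cons]; omega
    · simp

def find_seizure_episodes_alt (labels : List Int) : List (List (String × Int)) :=
  emitRuns (runsOf labels 0) none

-- ===== PRECONDITION & SPEC =====
def Spec_find_seizure_episodes (labels : List Int) (out : List (List (String × Int))) : Prop := out = find_seizure_episodes_alt labels
instance (labels : List Int) (out : List (List (String × Int))) : Decidable (Spec_find_seizure_episodes labels out) := by unfold Spec_find_seizure_episodes; infer_instance

-- ===== CLAIM (what is proved, stated in full; the proofs are below) =====
def Claim_equal_find_seizure_episodes : Prop := ∀ (labels : List Int), Dom_find_seizure_episodes labels → Spec_find_seizure_episodes labels (find_seizure_episodes labels)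

-- ===== LEMMAS AND PROOFS =====

-- Proof-only intermediate: gap-filter + trim of a raw episode list, carried with the
-- last accepted (untrimmed) ictal_end as an Option.
def process : List (Int × Int × Int) → Option Int → List (List (String × Int))
  | [], _ => []
  | (s, is_, ie) :: ts, last =>
    if gapOK last s then trimEp (s, is_, ie) :: process ts (some ie)
    else process ts last

theorem foldl_filt_process (raw : List (Int × Int × Int)) :
    ∀ acc : List (Int × Int × Int),
      (raw.foldl filtStep acc).map trimEp
        = acc.map trimEp ++ process raw (acc.getLast?.map (·.2.2)) := by
  induction raw with
  | nil => intro acc; simp [process]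
  | cons ep ts ih =>
    intro acc
    obtain ⟨s, is_, ie⟩ := ep
    simp only [List.foldl_cons, filtStep, process]
    cases hl : acc.getLast? with
    | none =>
      have hacc : acc = [] := List.getLast?_eq_none_iff.mp hl
      subst hacc
      rw [ih]
      simp [gapOK]
    | some l =>
      simp only [Option.map_some, gapOK]
      by_cases hlt : s - l.2.2 < 1300
      · rw [if_pos hlt, ih, hl]
        have : ¬ (s - l.2.2 ≥ 1300) := by omega
        simp [this]
      · rw [if_neg hlt, ih]
        have hg : (acc ++ [(s, is_, ie)]).getLast? = some (s, is_, ie) := by simp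
        rw [hg]
        have : s - l.2.2 ≥ 1300 := by omega
        simp [this]

-- Skipping a run of a non-2 value element by element (A) lands on the same suffix
-- and index as skipping the whole run (B).
theorem rawScan_span_ne_two (v : Int) (hv : v ≠ 2) :
    ∀ (xs : List Int) (i : Int), rawScan xs i = rawScan (spanEq v xs i).2 (spanEq v xs i).1 := by
  intro xs
  induction xs with
  | nil => intro i; simp [spanEq]
  | cons x xs ih =>
    intro i
    by_cases hx : x = v
    · subst hx
      rw [show spanEq x (x :: xs) i = spanEq x xs (i + 1) by simp [spanEq]]
      rw [show rawScan (x :: xs) i = rawScan xs (i + 1) by rw [rawScan]; simp [hv]]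
      exact ih (i + 1)
    · simp [spanEq, hx]

-- One step of emitRuns at a 2-run followed by a 1-run.
theorem emitRuns_cons2 (i j s2 k : Int) (rest2 : List (Int × Int × Int)) (last : Option Int) :
    emitRuns ((2, i, j) :: (1, s2, k) :: rest2) last
      = if gapOK last i then trimEp (i, j, k) :: emitRuns rest2 (some k)
        else emitRuns rest2 last := by
  rw [emitRuns]; simp [pairRun, trimEp]

-- One step of emitRuns at a 2-run followed by a non-1 run.
theorem emitRuns_cons2_ne1 (i j w s2 e2 : Int) (r2 : List (Int × Int × Int)) (last : Option Int)
    (hw : w ≠ 1) :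
    emitRuns ((2, i, j) :: (w, s2, e2) :: r2) last
      = if gapOK last i then trimEp (i, j, j) :: emitRuns ((w, s2, e2) :: r2) (some j)
        else emitRuns ((w, s2, e2) :: r2) last := by
  rw [emitRuns]; simp [pairRun, trimEp, hw]

theorem process_cons (s is_ ie : Int) (ts : List (Int × Int × Int)) (last : Option Int) :
    process ((s, is_, ie) :: ts) last
      = if gapOK last s then trimEp (s, is_, ie) :: process ts (some ie) else process ts last := by
  rw [process]

-- Core correspondence: B's run walk equals filter+trim (process) of A's raw scan.
theorem emitRuns_runsOf (n : Nat) :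
    ∀ (xs : List Int), xs.length ≤ n →
      ∀ (i : Int) (last : Option Int),
        emitRuns (runsOf xs i) last = process (rawScan xs i) last := by
  induction n with
  | zero =>
    intro xs hxs i last
    have : xs = [] := List.eq_nil_of_length_eq_zero (Nat.le_zero.mp hxs)
    subst this
    simp [runsOf, rawScan, emitRuns, process]
  | succ n ih =>
    intro xs hxs i last
    cases xs with
    | nil => simp [runsOf, rawScan, emitRuns, process]
    | cons x xs =>
      simp only [List.length_cons, Nat.succ_le_succ_iff] at hxs
      by_cases hx : x = 2
      · subst hx
        rw [runsOf, rawScan]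
        simp only [if_true]
        have hlen := spanEq_len_le 2 xs (i + 1)
        rcases h2 : spanEq 2 xs (i + 1) with ⟨j, ys⟩
        rw [h2] at hlen
        dsimp only at hlen ⊢
        cases ys with
        | nil =>
          simp [runsOf, rawScan, spanEq, emitRuns, process, pairRun, trimEp]
        | cons y ys2 =>
          simp only [List.length_cons] at hlen
          by_cases hy : y = 1
          · subst hy
            have hsp : spanEq 1 ((1:Int) :: ys2) j = spanEq 1 ys2 (j + 1) := by simp [spanEq]
            rcases h1 : spanEq 1 ys2 (j + 1) with ⟨k, zs⟩
            have hlen2 := spanEq_len_le 1 ys2 (j + 1)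
            rw [h1] at hlen2
            dsimp only at hlen2 ⊢
            have hn : zs.length ≤ n := by omega
            rw [hsp, h1, runsOf, h1]
            dsimp only
            rw [emitRuns_cons2, process_cons, ih zs hn k (some k), ih zs hn k last]
          · have hsp : spanEq 1 (y :: ys2) j = (j, y :: ys2) := by
              cases ys2 <;> simp [spanEq, hy]
            have hn : (y :: ys2).length ≤ n := by simp only [List.length_cons]; omega
            rw [hsp]
            dsimp only
            rw [runsOf, emitRuns_cons2_ne1 i j y _ _ _ last hy, ← runsOf,
              process_cons, ih (y :: ys2) hn j (some j), ih (y :: ys2) hn j last]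
      · rw [runsOf, rawScan]
        simp only [if_neg hx]
        rw [emitRuns]
        simp only [if_neg hx]
        rw [rawScan_span_ne_two x hx xs (i + 1)]
        exact ih _ (le_trans (spanEq_len_le x xs (i + 1)) hxs) _ last

-- ===== VERDICT (by name: the statement is the Claim_ definition above) =====
theorem find_seizure_episodes_spec : Claim_equal_find_seizure_episodes := by
  intro labels _
  unfold Spec_find_seizure_episodes find_seizure_episodes find_seizure_episodes_alt
  rw [emitRuns_runsOf labels.length labels le_rfl 0 none]
  have := foldl_filt_process (rawScan labels 0) []
  simpa using this
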